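-- pv_equiv track=rewrite | github.com/tlstommy/xurtracker | src/generateJSON.py | perkSort
-- ===== SOURCE A (Python) =====
-- def perkSort(perkList):
--
--     newPerkListDict = {}
--
--     #group by subtypes
--     for perk in perkList:
--         perkType = perk["perkSubType"]
--         if perkType not in newPerkListDict:
--             newPerkListDict[perkType] = []
--         newPerkListDict[perkType].append(perk)
--
--     newPerkList = []
--
--     for perkType, perks in newPerkListDict.items():
--         newPerkList.extend(perks)
--
--     return newPerkList
-- ===== SOURCE B (Python) =====
-- def perkSort(perkList):
--     # distinct subtypes in first-seen order, then one filtering rescan per subtype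
--     seen = []
--     for perk in perkList:
--         t = perk["perkSubType"]
--         if t not in seen:
--             seen.append(t)
--     return [p for t in seen for p in perkList if p["perkSubType"] == t]
-- ===== Notes on version B (the rewrite author's own statement) =====
-- stated objective: alternative
-- what changed: Replaces single-pass bucket accumulation in a dict with a distinct-subtype index pass followed by one filtering rescan of the whole list per subtype, concatenating the filters.
import Mathlib
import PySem

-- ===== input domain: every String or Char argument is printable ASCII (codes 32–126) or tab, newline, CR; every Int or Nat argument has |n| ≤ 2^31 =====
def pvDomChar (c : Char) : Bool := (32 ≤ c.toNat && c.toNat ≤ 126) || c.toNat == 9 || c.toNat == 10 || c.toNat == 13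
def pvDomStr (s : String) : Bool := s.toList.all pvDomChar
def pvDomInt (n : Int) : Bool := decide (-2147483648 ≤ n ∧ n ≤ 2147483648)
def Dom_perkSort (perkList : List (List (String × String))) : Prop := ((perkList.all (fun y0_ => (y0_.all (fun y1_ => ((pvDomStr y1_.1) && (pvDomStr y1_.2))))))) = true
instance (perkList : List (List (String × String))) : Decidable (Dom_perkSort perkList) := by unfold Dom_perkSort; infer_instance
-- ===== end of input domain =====

-- B groups by rescanning: distinct subtypes in first-seen order, then one filter per subtype (alternative decomposition, not faster).

-- shared helper: perk["perkSubType"] with default "" (the KeyError case is excluded by Pre_)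
def pvKey (perk : List (String × String)) : String :=
  PySem.Dict.getD (PySem.Dict.mk perk) "perkSubType" ""

-- ===== PORT A =====
def perkSort (perkList : List (List (String × String))) : List (List (String × String)) :=
  let d := perkList.foldl (fun d perk =>
    let t := pvKey perk
    let d := if d.contains t then d else d.insert t ([] : List (List (String × String)))
    d.modify t [] (fun l => l ++ [perk])) PySem.Dict.empty
  d.items.foldl (fun acc p => acc ++ p.2) []

-- ===== PORT B =====
def perkSort_alt (perkList : List (List (String × String))) : List (List (String × String)) :=
  let seen := perkList.foldl (fun s perk => PySem.Set.add s (pvKey perk)) ([] : List String)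
  seen.flatMap (fun t => perkList.filter (fun p => pvKey p == t))

-- ===== PRECONDITION & SPEC =====
-- Pre_ excludes exactly the perks missing the "perkSubType" key, on which Python A raises KeyError.
def Pre_perkSort (perkList : List (List (String × String))) : Prop :=
  ∀ perk ∈ perkList, "perkSubType" ∈ perk.map Prod.fst
instance (perkList : List (List (String × String))) : Decidable (Pre_perkSort perkList) := by unfold Pre_perkSort; infer_instance
def pvWitness_perkSort : (List (List (String × String))) := [[("perkSubType", "a"), ("id", "1")], [("perkSubType", "b")]]

def Spec_perkSort (perkList : List (List (String × String))) (out : List (List (String × String))) : Prop := out = perkSort_alt perkList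
instance (perkList : List (List (String × String))) (out : List (List (String × String))) : Decidable (Spec_perkSort perkList out) := by unfold Spec_perkSort; infer_instance

-- ===== CLAIM (what is proved, stated in full; the proofs are below) =====
def Claim_equal_perkSort : Prop := ∀ (perkList : List (List (String × String))), Dom_perkSort perkList → Pre_perkSort perkList → Spec_perkSort perkList (perkSort perkList)

-- ===== LEMMAS AND PROOFS =====

-- A's step (insert-[]-if-absent then append) is exactly dict modify with default []
theorem perkSort_step_eq_modify (d : PySem.Dict String (List (List (String × String)))) (perk : List (String × String)) :
    (let t := pvKey perk
     let d := if d.contains t then d else d.insert t ([] : List (List (String × String)))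
     d.modify t [] (fun l => l ++ [perk]))
    = d.modify (pvKey perk) [] (fun l => l ++ [perk]) := by
  by_cases h : d.contains (pvKey perk) = true
  · simp only [h, if_true]
  · simp only [Bool.not_eq_true] at h
    simp only [h, Bool.false_eq_true, if_false, PySem.Dict.modify,
      PySem.Dict.getD_insert_self, PySem.Dict.insert_insert_self,
      PySem.Dict.getD_of_not_contains d _ h]

-- the whole dict-building loop, keyed by pvKey
theorem perkSort_loop_eq (perkList : List (List (String × String))) :
    perkList.foldl (fun d perk =>
      let t := pvKey perk
      let d := if d.contains t then d else d.insert t ([] : List (List (String × String)))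
      d.modify t [] (fun l => l ++ [perk])) PySem.Dict.empty
    = (perkList.map (fun p => (pvKey p, p))).foldl
        (fun d q => d.modify q.1 [] (fun l => l ++ [q.2])) PySem.Dict.empty := by
  rw [List.foldl_map]
  congr 1
  funext d perk
  exact perkSort_step_eq_modify d perk

-- each bucket of the dict-building loop is a filter of the input list
theorem perkSort_getD_loop (perkList : List (List (String × String))) (t : String) :
    ((perkList.map (fun p => (pvKey p, p))).foldl
        (fun d q => d.modify q.1 [] (fun l => l ++ [q.2])) PySem.Dict.empty).getD t []
    = perkList.filter (fun p => pvKey p == t) := by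
  rw [PySem.Dict.getD_foldl_modify_append, List.filter_map]
  simp [Function.comp_def]

-- ===== VERDICT (by name: the statement is the Claim_ definition above) =====
theorem perkSort_spec : Claim_equal_perkSort := by
  unfold Claim_equal_perkSort
  intro perkList _ _
  unfold Spec_perkSort perkSort perkSort_alt
  dsimp only
  rw [perkSort_loop_eq]
  have hloop : (perkList.map (fun p => (pvKey p, p))).foldl
        (fun d q => d.modify q.1 [] (fun l => l ++ [q.2])) PySem.Dict.empty
      = perkList.foldl (fun d perk => d.modify (pvKey perk) [] (fun l => l ++ [perk])) PySem.Dict.empty := by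
    rw [List.foldl_map]
  have hnd : ((perkList.map (fun p => (pvKey p, p))).foldl
        (fun d q => d.modify q.1 [] (fun l => l ++ [q.2])) PySem.Dict.empty).keys.Nodup := by
    rw [hloop]
    exact PySem.Dict.nodup_keys_foldl_modify_key perkList pvKey [] (fun _ perk => (fun l => l ++ [perk])) PySem.Dict.empty (by simp [PySem.Dict.keys_empty])
  have hkeys : ((perkList.map (fun p => (pvKey p, p))).foldl
        (fun d q => d.modify q.1 [] (fun l => l ++ [q.2])) PySem.Dict.empty).keys
      = PySem.Set.ofList (perkList.map pvKey) := by
    rw [hloop, PySem.Dict.keys_foldl_modify_key]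
    simp [PySem.Dict.keys_empty, PySem.Set.update_nil_left]
  have hseen : perkList.foldl (fun s perk => PySem.Set.add s (pvKey perk)) ([] : List String)
      = PySem.Set.ofList (perkList.map pvKey) := by
    rw [← PySem.Set.update_map_eq_foldl_add, PySem.Set.update_nil_left]
  rw [PySem.Dict.items_eq_map_keys _ hnd ([] : List (List (String × String)))]
  rw [PySem.List.foldl_append_eq_flatMap]
  rw [List.flatMap_map]
  simp only [hkeys, hseen]
  simp only [List.nil_append, perkSort_getD_loop]
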